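-- pv_equiv track=rewrite | github.com/Kepter/CompetitiveProgramming | hackerrank/Implementation/organizing-containers-of-balls.py | organizingContainers
-- ===== SOURCE A (Python) =====
-- def organizingContainers(container):
--     totals = []
--     sizes = {}
--
--     for i in range(len(container)):
--         totals.append(0)
--
--     for c in container:
--         size = 0
--         for i in range(len(c)):
--             totals[i] += c[i]
--             size += c[i]
--
--         if size not in sizes:
--             sizes[size] = 0
--
--         sizes[size] += 1
--
--     for t in totals:
--         if (t not in sizes) or (sizes[t] == 0):
--             return "Impossible"
--
--     return "Possible"
-- ===== SOURCE B (Python) =====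
-- def organizingContainers(container):
--     n = len(container)
--     row_sums = sorted(sum(r) for r in container)
--     col_sums = sorted(sum(r[j] for r in container if j < len(r)) for j in range(n))
--     i = 0
--     for c in col_sums:
--         while i < len(row_sums) and row_sums[i] < c:
--             i += 1
--         if i == len(row_sums) or row_sums[i] != c:
--             return "Impossible"
--     return "Possible"
-- ===== Notes on version B (the rewrite author's own statement) =====
-- stated objective: alternative
-- what changed: Replaces A's mutable totals array, dict counter of row sums and early-return dict-membership scan with a sorting-based algorithm: sort the row sums and the column sums once, then decide every membership with a single two-pointer merge scan over the two sorted lists.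
import Mathlib
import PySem

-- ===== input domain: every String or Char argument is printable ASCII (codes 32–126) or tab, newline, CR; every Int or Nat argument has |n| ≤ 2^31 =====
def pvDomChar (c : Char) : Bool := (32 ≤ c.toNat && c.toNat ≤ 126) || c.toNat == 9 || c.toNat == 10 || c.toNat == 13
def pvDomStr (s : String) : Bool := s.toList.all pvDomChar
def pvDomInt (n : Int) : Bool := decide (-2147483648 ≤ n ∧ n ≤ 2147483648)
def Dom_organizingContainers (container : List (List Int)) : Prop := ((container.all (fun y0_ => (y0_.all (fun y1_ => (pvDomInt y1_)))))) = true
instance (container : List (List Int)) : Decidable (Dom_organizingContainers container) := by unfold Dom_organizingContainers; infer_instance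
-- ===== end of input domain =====

-- B replaces A's mutable totals array + dict counter + early-return dict-membership scan with a
-- sorting-based algorithm: sort the row sums and the column sums once, then decide every
-- membership with a single two-pointer merge scan (objective: alternative, same result).

-- ===== PORT A =====
-- inner 'for i in range(len(c)): totals[i] += c[i]; size += c[i]'  (indices in range under Pre_)
def aInner (tot : List Int) (c : List Int) : List Int × Int :=
  (List.range c.length).foldl
    (fun st i => (st.1.set i (st.1.getD i 0 + c.getD i 0), st.2 + c.getD i 0)) (tot, 0)

-- body of 'for c in container' : update totals, then the sizes dict
def aRow (st : List Int × PySem.Dict Int Int) (c : List Int) : List Int × PySem.Dict Int Int :=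
  let p := aInner st.1 c
  let sizes := if st.2.contains p.2 then st.2 else st.2.insert p.2 0
  (p.1, sizes.insert p.2 (sizes.getD p.2 0 + 1))

-- final 'for t in totals: if t not in sizes or sizes[t] == 0: return "Impossible"'
def aCheck : List Int → PySem.Dict Int Int → String
  | [], _ => "Possible"
  | t :: ts, sz => if !(sz.contains t) || (sz.getD t 0 == 0) then "Impossible" else aCheck ts sz

def organizingContainers (container : List (List Int)) : String :=
  let totals0 := (List.range container.length).foldl (fun t _ => t ++ [(0 : Int)]) []
  let st := container.foldl aRow (totals0, PySem.Dict.empty)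
  aCheck st.1 st.2

-- ===== PORT B =====
-- 'while i < len(row_sums) and row_sums[i] < c: i += 1'
def bSkip (R : List Int) (c : Int) (i : Nat) : Nat :=
  if h : i < R.length ∧ R.getD i 0 < c then bSkip R c (i + 1) else i
termination_by R.length - i
decreasing_by omega

-- 'for c in col_sums: …skip…; if i == len(row_sums) or row_sums[i] != c: return "Impossible"'
def bScan (R : List Int) : List Int → Nat → String
  | [], _ => "Possible"
  | c :: cs, i =>
    let i' := bSkip R c i
    if i' == R.length || !(R.getD i' 0 == c) then "Impossible" else bScan R cs i'

def organizingContainers_alt (container : List (List Int)) : String :=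
  let n := container.length
  -- sorted(sum(r) for r in container)
  let rowSums := PySem.List.sorted (container.map (fun r => r.foldl (· + ·) 0)) (fun x => x) false
  -- sorted(sum(r[j] for r in container if j < len(r)) for j in range(n))
  let colSums := PySem.List.sorted ((List.range n).map (fun j =>
      container.foldl (fun a r => a + (if j < r.length then r.getD j 0 else 0)) 0)) (fun x => x) false
  bScan rowSums colSums 0

-- ===== PRECONDITION & SPEC =====
-- Pre_ excludes exactly the inputs where A raises IndexError: a row longer than the number of
-- rows makes 'totals[i] += c[i]' index past the end of totals.
def Pre_organizingContainers (container : List (List Int)) : Prop :=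
  ∀ c ∈ container, c.length ≤ container.length
instance (container : List (List Int)) : Decidable (Pre_organizingContainers container) := by
  unfold Pre_organizingContainers; infer_instance

def pvWitness_organizingContainers : List (List Int) := [[1, 2], [2, 1]]

def Spec_organizingContainers (container : List (List Int)) (out : String) : Prop := out = organizingContainers_alt container
instance (container : List (List Int)) (out : String) : Decidable (Spec_organizingContainers container out) := by unfold Spec_organizingContainers; infer_instance

-- ===== CLAIM (what is proved, stated in full; the proofs are below) =====
def Claim_equal_organizingContainers : Prop := ∀ (container : List (List Int)), Dom_organizingContainers container → Pre_organizingContainers container → Spec_organizingContainers container (organizingContainers container)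

-- ===== LEMMAS AND PROOFS =====

theorem foldl_add_shift (f : List Int → Int) (rows : List (List Int)) :
    ∀ a : Int, rows.foldl (fun a row => a + f row) a = a + (rows.map f).sum := by
  induction rows with
  | nil => intro a; simp
  | cons r rs ih => intro a; simp [List.foldl, ih, add_assoc]

-- the initial totals list is n zeros
theorem totals0_eq {α : Type} (l : List α) :
    ∀ t : List Int, l.foldl (fun t _ => t ++ [(0 : Int)]) t = t ++ List.replicate l.length 0 := by
  induction l with
  | nil => intro t; simp
  | cons x xs ih =>
    intro t
    rw [List.foldl_cons, ih, List.append_assoc]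
    simp [List.replicate_succ]

-- inner loop: length of totals is preserved (any index list)
theorem aInner_len (c : List Int) (l : List Nat) :
    ∀ (tot : List Int) (s : Int),
      (l.foldl (fun st i => (st.1.set i (st.1.getD i 0 + c.getD i 0), st.2 + c.getD i 0)) (tot, s)).1.length
        = tot.length := by
  induction l with
  | nil => intro tot s; rfl
  | cons i l ih =>
    intro tot s
    rw [List.foldl_cons, ih]
    simp

-- inner loop: the accumulated size (any index list)
theorem aInner_snd (c : List Int) (l : List Nat) :
    ∀ (tot : List Int) (s : Int),
      (l.foldl (fun st i => (st.1.set i (st.1.getD i 0 + c.getD i 0), st.2 + c.getD i 0)) (tot, s)).2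
        = s + (l.map (fun i => c.getD i 0)).sum := by
  induction l with
  | nil => intro tot s; simp
  | cons i l ih =>
    intro tot s
    rw [List.foldl_cons, ih]
    simp [add_assoc]

theorem getD_set (xs : List Int) (i : Nat) (v : Int) (j : Nat) :
    (xs.set i v).getD j 0 = if j = i ∧ i < xs.length then v else xs.getD j 0 := by
  simp only [List.getD, List.getElem?_set]
  split_ifs with h1 h2 h3 h4 h5 <;> simp_all

-- inner loop over range m: pointwise effect on totals
theorem aInner_getD (c : List Int) (m : Nat) :
    ∀ (tot : List Int) (s : Int), m ≤ tot.length → ∀ j : Nat,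
      ((List.range m).foldl (fun st i => (st.1.set i (st.1.getD i 0 + c.getD i 0), st.2 + c.getD i 0)) (tot, s)).1.getD j 0
        = tot.getD j 0 + (if j < m then c.getD j 0 else 0) := by
  induction m with
  | zero => intro tot s _ j; simp
  | succ m ih =>
    intro tot s hm j
    rw [List.range_succ, List.foldl_append, List.foldl_cons, List.foldl_nil]
    have hlen := aInner_len c (List.range m) tot s
    rw [getD_set]
    rw [ih tot s (by omega) m, ih tot s (by omega) j, hlen]
    by_cases hj : j = m
    · have hmlt : m < tot.length := by omega
      subst hj
      simp [hmlt]
    · simp only [hj, false_and, if_false]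
      split_ifs <;> first | rfl | omega

-- range-indexed sum over c is just c summed
theorem range_getD_sum (c : List Int) :
    ((List.range c.length).map (fun i => c.getD i 0)).sum = c.sum := by
  congr 1
  apply List.ext_getElem
  · simp
  · intro i h1 h2
    simp only [List.getElem_map, List.getElem_range, List.getD_eq_getElem?_getD,
      List.getElem?_eq_getElem h2, Option.getD_some]

-- one dict step of A equals the counter step
theorem sizes_step (sz : PySem.Dict Int Int) (s : Int) :
    (let sz' := if sz.contains s then sz else sz.insert s 0;
     sz'.insert s (sz'.getD s 0 + 1)) = sz.insert s (sz.getD s 0 + 1) := by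
  by_cases h : sz.contains s
  · simp [h]
  · have hb : sz.contains s = false := by simpa using h
    have h0 : sz.getD s 0 = 0 := PySem.Dict.getD_of_not_contains _ _ hb
    simp [h, PySem.Dict.getD_insert_self, PySem.Dict.insert_insert_self, h0]

-- the per-column sum
def colAdd (rows : List (List Int)) (j : Nat) : Int :=
  (rows.map (fun r => if j < r.length then r.getD j 0 else 0)).sum

-- the rows fold: totals component and sizes component, characterised together
theorem rows_fold (rows : List (List Int)) :
    ∀ (tot : List Int) (sz : PySem.Dict Int Int),
      (∀ c ∈ rows, c.length ≤ tot.length) →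
      (rows.foldl aRow (tot, sz)).1.length = tot.length ∧
      (∀ j : Nat, (rows.foldl aRow (tot, sz)).1.getD j 0 = tot.getD j 0 + colAdd rows j) ∧
      (rows.foldl aRow (tot, sz)).2
        = (rows.map List.sum).foldl (fun d x => d.insert x (d.getD x 0 + 1)) sz := by
  induction rows with
  | nil => intro tot sz _; refine ⟨rfl, fun j => by simp [colAdd], rfl⟩
  | cons c rs ih =>
    intro tot sz hpre
    have hc : c.length ≤ tot.length := hpre c (by simp)
    have hsnd : (aInner tot c).2 = c.sum := by
      rw [aInner, aInner_snd, range_getD_sum, zero_add]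
    have hlen1 : (aInner tot c).1.length = tot.length := aInner_len c _ tot 0
    have hget1 : ∀ j : Nat, (aInner tot c).1.getD j 0
        = tot.getD j 0 + (if j < c.length then c.getD j 0 else 0) := by
      intro j; exact aInner_getD c c.length tot 0 hc j
    have hrow : aRow (tot, sz) c
        = ((aInner tot c).1, sz.insert c.sum (sz.getD c.sum 0 + 1)) := by
      show ((aInner tot c).1,
        (if sz.contains (aInner tot c).2 then sz else sz.insert (aInner tot c).2 0).insert
          (aInner tot c).2
          ((if sz.contains (aInner tot c).2 then sz else sz.insert (aInner tot c).2 0).getD (aInner tot c).2 0 + 1)) = _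
      rw [hsnd]
      exact congrArg _ (sizes_step sz c.sum)
    have hpre' : ∀ c' ∈ rs, c'.length ≤ (aInner tot c).1.length := by
      intro c' hc'; rw [hlen1]; exact hpre c' (by simp [hc'])
    obtain ⟨h1, h2, h3⟩ := ih (aInner tot c).1 (sz.insert c.sum (sz.getD c.sum 0 + 1)) hpre'
    refine ⟨?_, ?_, ?_⟩
    · simpa [List.foldl, hrow, h1] using hlen1
    · intro j
      simp only [List.foldl, hrow, h2 j, hget1 j, colAdd, List.map_cons, List.sum_cons]
      ring
    · simp [List.foldl, hrow, h3]

-- A's final scan as an all-test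
theorem aCheck_eq (l : List Int) (sz : PySem.Dict Int Int) :
    aCheck l sz
      = if l.all (fun t => sz.contains t && !(sz.getD t 0 == 0)) then "Possible" else "Impossible" := by
  induction l with
  | nil => rfl
  | cons t ts ih =>
    rw [aCheck, ih, List.all_cons]
    by_cases h1 : sz.contains t <;> by_cases h2 : sz.getD t 0 == 0 <;> simp [h1, h2]

-- membership condition in the counter dict = list membership
theorem counter_cond (xs : List Int) (t : Int) :
    ((PySem.Dict.counter xs).contains t && !((PySem.Dict.counter xs).getD t 0 == 0))
      = decide (t ∈ xs) := by
  rw [PySem.Dict.getD_counter, PySem.Dict.contains_counter]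
  by_cases h : t ∈ xs
  · have hne : xs.count t ≠ 0 := by simp [List.count_eq_zero, h]
    simp [h, hne]
  · simp [h, List.count_eq_zero_of_not_mem h]

-- a row's foldl-sum is its sum
theorem row_foldl_sum (r : List Int) : r.foldl (· + ·) 0 = r.sum := by
  simp [List.sum_eq_foldl]

-- A, characterised: "Possible" iff every column sum is a member of the row sums
theorem a_char (container : List (List Int)) (hpre : Pre_organizingContainers container) :
    organizingContainers container
      = if ((List.range container.length).map (fun j => colAdd container j)).all
            (fun t => decide (t ∈ container.map List.sum))
        then "Possible" else "Impossible" := by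
  unfold organizingContainers
  set n := container.length with hn
  have htot0 : (List.range n).foldl (fun t _ => t ++ [(0 : Int)]) [] = List.replicate n 0 := by
    simp [totals0_eq (List.range n) []]
  have hpre' : ∀ c ∈ container, c.length ≤ (List.replicate n (0 : Int)).length := by
    intro c hc; simpa using hpre c hc
  obtain ⟨hlen, hget, hsz⟩ := rows_fold container (List.replicate n 0) PySem.Dict.empty hpre'
  simp only [htot0]
  have hTOT : (container.foldl aRow (List.replicate n 0, PySem.Dict.empty)).1
      = (List.range n).map (fun j => colAdd container j) := by
    apply List.ext_getElem
    · simp [hlen]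
    · intro j hj1 hj2
      have hj : j < n := by simpa [hlen] using hj1
      have hrep : (List.replicate n (0 : Int)).getD j 0 = 0 := by
        simp [List.getD_eq_getElem?_getD, hj]
      have hL : (container.foldl aRow (List.replicate n 0, PySem.Dict.empty)).1.getD j 0
          = colAdd container j := by rw [hget j, hrep, zero_add]
      calc (container.foldl aRow (List.replicate n 0, PySem.Dict.empty)).1[j]
          = (container.foldl aRow (List.replicate n 0, PySem.Dict.empty)).1.getD j 0 := by
            simp [List.getD_eq_getElem?_getD, List.getElem?_eq_getElem hj1]
        _ = colAdd container j := hL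
        _ = ((List.range n).map (fun j => colAdd container j))[j] := by
            simp
  have hSZ : (container.foldl aRow (List.replicate n 0, PySem.Dict.empty)).2
      = PySem.Dict.counter (container.map List.sum) := by
    rw [hsz, ← PySem.Dict.foldl_insert_getD_add_one_eq_counter]
  rw [aCheck_eq, hTOT, hSZ]
  congr 1
  exact congrArg (fun b => b = true)
    (congrArg ((List.range n).map (fun j => colAdd container j)).all
      (funext fun t => counter_cond (container.map List.sum) t))

-- ----- the two-pointer scan, characterised -----

-- bSkip moves forward, stays in range, skips only elements < c, and stops at the end or at an element ≥ c
theorem bSkip_spec (R : List Int) (c : Int) (i : Nat) (hi : i ≤ R.length) :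
    i ≤ bSkip R c i ∧ bSkip R c i ≤ R.length ∧
      (∀ k, i ≤ k → k < bSkip R c i → R.getD k 0 < c) ∧
      (bSkip R c i = R.length ∨ ¬ R.getD (bSkip R c i) 0 < c) := by
  fun_induction bSkip R c i with
  | case1 i h ih =>
    obtain ⟨h1, h2, h3, h4⟩ := ih (by omega)
    refine ⟨by omega, h2, ?_, h4⟩
    intro k hk1 hk2
    by_cases hk : k = i
    · subst hk; exact h.2
    · exact h3 k (by omega) hk2
  | case2 i h =>
    refine ⟨le_refl i, hi, fun k hk1 hk2 => absurd hk1 (by omega), ?_⟩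
    by_cases he : i = R.length
    · exact Or.inl he
    · exact Or.inr (fun hlt => h ⟨by omega, hlt⟩)

-- on sorted inputs the scan answers exactly the membership question
theorem bScan_eq (R : List Int)
    (hR : ∀ p q : Nat, p ≤ q → q < R.length → R.getD p 0 ≤ R.getD q 0) :
    ∀ (C : List Int), C.Pairwise (· ≤ ·) → ∀ i : Nat, i ≤ R.length →
      (∀ k, k < i → ∀ c ∈ C, R.getD k 0 < c) →
      bScan R C i
        = if C.all (fun c => decide (c ∈ R)) then "Possible" else "Impossible" := by
  intro C
  induction C with
  | nil => intro _ i _ _; simp [bScan]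
  | cons c cs ih =>
    intro hC i hi hinv
    obtain ⟨hs1, hs2, hs3, hs4⟩ := bSkip_spec R c i hi
    have hbelow : ∀ k, k < bSkip R c i → R.getD k 0 < c := by
      intro k hk
      by_cases hki : k < i
      · exact hinv k hki c (by simp)
      · exact hs3 k (by omega) hk
    rw [bScan]
    by_cases hend : bSkip R c i = R.length
    · have hnot : ¬ c ∈ R := by
        intro hc
        obtain ⟨m, hm, he⟩ := List.mem_iff_getElem.mp hc
        have : R.getD m 0 < c := hbelow m (by omega)
        rw [List.getD_eq_getElem?_getD, List.getElem?_eq_getElem hm, Option.getD_some, he] at this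
        omega
      have hcond : (bSkip R c i == R.length || !(R.getD (bSkip R c i) 0 == c)) = true := by
        simp [hend]
      rw [hcond]
      simp [hnot]
    · have hlt : bSkip R c i < R.length := by omega
      have hge : c ≤ R.getD (bSkip R c i) 0 := by
        rcases hs4 with h | h
        · exact absurd h hend
        · omega
      by_cases heq : R.getD (bSkip R c i) 0 = c
      · have hmem : c ∈ R := by
          rw [List.getD_eq_getElem?_getD, List.getElem?_eq_getElem hlt, Option.getD_some] at heq
          exact heq ▸ List.getElem_mem hlt
        have hcond : (bSkip R c i == R.length || !(R.getD (bSkip R c i) 0 == c)) = false := by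
          simp [hend, - List.getD_eq_getElem?_getD, heq]
        rw [hcond]
        simp only [Bool.false_eq_true, if_false]
        have hinv' : ∀ k, k < bSkip R c i → ∀ c' ∈ cs, R.getD k 0 < c' := by
          intro k hk c' hc'
          have h1 : R.getD k 0 < c := hbelow k hk
          have h2 : c ≤ c' := (List.pairwise_cons.mp hC).1 c' hc'
          omega
        rw [ih (List.pairwise_cons.mp hC).2 (bSkip R c i) hs2 hinv']
        simp [hmem]
      · have hgt : c < R.getD (bSkip R c i) 0 := by omega
        have hnot : ¬ c ∈ R := by
          intro hc
          obtain ⟨m, hm, he⟩ := List.mem_iff_getElem.mp hc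
          have hgetm : R.getD m 0 = c := by
            rw [List.getD_eq_getElem?_getD, List.getElem?_eq_getElem hm, Option.getD_some, he]
          by_cases hcase : m < bSkip R c i
          · have := hbelow m hcase
            omega
          · have := hR (bSkip R c i) m (by omega) hm
            omega
        have hcond : (bSkip R c i == R.length || !(R.getD (bSkip R c i) 0 == c)) = true := by
          simp [hend, - List.getD_eq_getElem?_getD, heq]
        rw [hcond]
        simp [hnot]

-- sorted(xs) is pointwise monotone in getD (in-range indices)
theorem sorted_getD_mono (xs : List Int) (p q : Nat) (hpq : p ≤ q)
    (hq : q < (PySem.List.sorted xs (fun x => x) false).length) :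
    (PySem.List.sorted xs (fun x => x) false).getD p 0
      ≤ (PySem.List.sorted xs (fun x => x) false).getD q 0 := by
  have hp : p < (PySem.List.sorted xs (fun x => x) false).length := by omega
  have := PySem.List.sorted_id_getElem_mono (xs := xs) (p := p) (q := q) hpq hq
  simpa [List.getD_eq_getElem?_getD, List.getElem?_eq_getElem hp, List.getElem?_eq_getElem hq]
    using this

-- ===== VERDICT (by name: the statement is the Claim_ definition above) =====
theorem organizingContainers_spec : Claim_equal_organizingContainers := by
  intro container _ hpre
  unfold Spec_organizingContainers
  rw [a_char container hpre]
  have expand : organizingContainers_alt container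
      = bScan (PySem.List.sorted (container.map (fun r => r.foldl (· + ·) 0)) (fun x => x) false)
          (PySem.List.sorted ((List.range container.length).map (fun j =>
            container.foldl (fun a r => a + (if j < r.length then r.getD j 0 else 0)) 0)) (fun x => x) false)
          0 := rfl
  have hrow : container.map (fun r => r.foldl (· + ·) 0) = container.map List.sum := by
    simp [row_foldl_sum]
  have hcol : (List.range container.length).map (fun j =>
      container.foldl (fun a r => a + (if j < r.length then r.getD j 0 else 0)) 0)
      = (List.range container.length).map (fun j => colAdd container j) := by
    refine List.map_congr_left (fun j _ => ?_)
    simpa [colAdd] using foldl_add_shift (fun r => if j < r.length then r.getD j 0 else 0) container 0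
  rw [expand, hrow, hcol]
  set R0 := container.map List.sum with hR0
  set C0 := (List.range container.length).map (fun j => colAdd container j) with hC0
  have hCpair : (PySem.List.sorted C0 (fun x => x) false).Pairwise (· ≤ ·) := by
    have := PySem.List.sorted_pairwise (xs := C0) (key := fun x => x)
    simpa using this
  rw [bScan_eq (PySem.List.sorted R0 (fun x => x) false)
      (fun p q hpq hq => sorted_getD_mono R0 p q hpq hq)
      (PySem.List.sorted C0 (fun x => x) false) hCpair 0 (Nat.zero_le _)
      (fun k hk => absurd hk (by omega))]
  have hperm : (PySem.List.sorted C0 (fun x => x) false).Perm C0 :=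
    PySem.List.sorted_perm C0 (fun x => x) false
  have hAll : (PySem.List.sorted C0 (fun x => x) false).all
        (fun c => decide (c ∈ PySem.List.sorted R0 (fun x => x) false))
      = C0.all (fun t => decide (t ∈ R0)) := by
    rw [Bool.eq_iff_iff]
    simp only [List.all_eq_true, decide_eq_true_eq]
    constructor
    · intro h c hc
      have := h c (hperm.mem_iff.mpr hc)
      simpa [PySem.List.mem_sorted] using this
    · intro h c hc
      have := h c (hperm.mem_iff.mp hc)
      simpa [PySem.List.mem_sorted] using this
  rw [hAll]
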